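-- pv_equiv track=rewrite | github.com/vhzkclq0705/PS_Python | Programmers/PCCP/2번 퍼즐 게임 챌린지.py | solution
-- ===== SOURCE A (Python) =====
-- def solution(diffs, times, limit):
--     start, end = min(diffs), max(diffs)
--     level = 0
--
--     while start <= end:
--         mid = (start + end) // 2
--         total = 0
--
--         for i in range(len(diffs)):
--             time_prev = times[i - 1] if i else 0
--             total += (diffs[i] - mid) * (times[i] + time_prev) + times[i] if diffs[i] > mid else times[i]
--
--         if total <= limit:
--             level = mid
--             end = mid - 1
--         else:
--             start = mid + 1
--
--     return level
-- ===== SOURCE B (Python) =====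
-- def solution(diffs, times, limit):
--     # Sort (diff, weight) pairs once, precompute suffix sums, then each
--     # feasibility check inside the binary search costs O(log n).
--     n = len(diffs)
--     base = 0
--     pairs = []
--     for i in range(n):
--         prev = times[i - 1] if i else 0
--         base += times[i]
--         pairs.append((diffs[i], times[i] + prev))
--     pairs.sort(key=lambda p: p[0])
--
--     # suf[k] = (sum of w, sum of d*w) over pairs[k:]
--     suf = [(0, 0)] * (n + 1)
--     for k in range(n - 1, -1, -1):
--         d, w = pairs[k]
--         sw, sdw = suf[k + 1]
--         suf[k] = (sw + w, sdw + d * w)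
--
--     def count_le(x):
--         lo, hi = 0, n
--         while lo < hi:
--             m = (lo + hi) // 2
--             if pairs[m][0] <= x:
--                 lo = m + 1
--             else:
--                 hi = m
--         return lo
--
--     start, end = min(diffs), max(diffs)
--     level = 0
--     while start <= end:
--         mid = (start + end) // 2
--         j = count_le(mid)
--         sw, sdw = suf[j]
--         if base + sdw - mid * sw <= limit:
--             level = mid
--             end = mid - 1
--         else:
--             start = mid + 1
--     return level
-- ===== Notes on version B (the rewrite author's own statement) =====
-- stated objective: faster
-- what changed: B sorts the (difficulty, weight) pairs once and precomputes suffix sums of w and d*w, so each feasibility check inside the binary search is a threshold binary search plus O(1) arithmetic instead of A's O(n) rescan.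
import Mathlib
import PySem

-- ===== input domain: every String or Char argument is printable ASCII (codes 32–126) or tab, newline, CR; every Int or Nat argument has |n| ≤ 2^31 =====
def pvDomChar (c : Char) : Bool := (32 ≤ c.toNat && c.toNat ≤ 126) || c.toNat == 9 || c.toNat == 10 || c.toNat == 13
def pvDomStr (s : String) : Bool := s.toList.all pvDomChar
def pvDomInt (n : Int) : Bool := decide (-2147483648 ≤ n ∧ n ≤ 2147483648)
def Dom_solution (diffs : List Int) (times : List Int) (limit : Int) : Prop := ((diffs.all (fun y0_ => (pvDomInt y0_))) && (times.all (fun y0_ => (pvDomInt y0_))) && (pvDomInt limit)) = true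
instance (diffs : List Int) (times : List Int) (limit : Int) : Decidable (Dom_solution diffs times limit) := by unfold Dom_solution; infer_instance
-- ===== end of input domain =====

-- B replaces A's O(n) rescan per binary-search step by a sorted pair list with
-- suffix sums, making each feasibility check a threshold binary search (objective: faster).


-- ===== PORT A =====
-- the inner 'for i in range(len(diffs))' loop computing 'total' for a given mid
def pvTotalA (diffs : List Int) (times : List Int) (mid : Int) : Int :=
  (PySem.List.pyRange 0 (PySem.List.len diffs) 1).foldl (fun total i =>
    let time_prev : Int := if i ≠ 0 then PySem.List.pyGetD times (i - 1) 0 else 0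
    total + (if PySem.List.pyGetD diffs i 0 > mid then
        (PySem.List.pyGetD diffs i 0 - mid) * (PySem.List.pyGetD times i 0 + time_prev)
          + PySem.List.pyGetD times i 0
      else PySem.List.pyGetD times i 0)) 0

-- the 'while start <= end' binary search of A; the Nat fuel only makes the loop
-- structurally total: it starts at the interval length, which strictly drops each
-- iteration, so the 0-fuel branch is never taken on the values Python reaches
def pvLoopA (diffs : List Int) (times : List Int) (limit : Int) :
    Nat → Int → Int → Int → Int
  | 0, _, _, level => level
  | fuel + 1, start, fin, level =>
    if start ≤ fin then
      let mid := PySem.Int.floordiv (start + fin) 2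
      if pvTotalA diffs times mid ≤ limit then
        pvLoopA diffs times limit fuel start (mid - 1) mid
      else
        pvLoopA diffs times limit fuel (mid + 1) fin level
    else level

-- min(diffs)/max(diffs) raise ValueError on [] — excluded by Pre_solution (getD 0 unreached)
def solution (diffs : List Int) (times : List Int) (limit : Int) : Int :=
  let start := (PySem.List.min? diffs (fun x => x)).getD 0
  let fin := (PySem.List.max? diffs (fun x => x)).getD 0
  pvLoopA diffs times limit (fin + 1 - start).toNat start fin 0

-- ===== PORT B =====
-- the first loop of B: accumulates (base, pairs)
def pvBuild (diffs : List Int) (times : List Int) : Int × List (Int × Int) :=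
  (PySem.List.pyRange 0 (PySem.List.len diffs) 1).foldl (fun acc i =>
    let prev : Int := if i ≠ 0 then PySem.List.pyGetD times (i - 1) 0 else 0
    (acc.1 + PySem.List.pyGetD times i 0,
     acc.2 ++ [(PySem.List.pyGetD diffs i 0, PySem.List.pyGetD times i 0 + prev)]))
    (0, [])

-- B's backward suffix-sum loop: pvSuf l has length l.length + 1,
-- entry k = (sum of w, sum of d*w) over l[k:]
def pvSuf : List (Int × Int) → List (Int × Int)
  | [] => [(0, 0)]
  | p :: r =>
    let s := pvSuf r
    let h := s.headD (0, 0)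
    (h.1 + p.2, h.2 + p.1 * p.2) :: s

-- B's hand-written count_le binary search (number of pairs with fst ≤ x); the Nat
-- fuel (= the interval length, which strictly drops) only makes it structurally total
def pvCountLe (s : List (Int × Int)) (x : Int) : Nat → Int → Int → Int
  | 0, lo, _ => lo
  | fuel + 1, lo, hi =>
    if lo < hi then
      let m := PySem.Int.floordiv (lo + hi) 2
      if (PySem.List.pyGetD s m (0, 0)).1 ≤ x then
        pvCountLe s x fuel (m + 1) hi
      else
        pvCountLe s x fuel lo m
    else lo

-- total(mid) for B: base + suffix sums at the threshold index
def pvTotalB (base : Int) (s : List (Int × Int)) (suf : List (Int × Int)) (mid : Int) : Int :=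
  let j := pvCountLe s mid (PySem.List.len s).toNat 0 (PySem.List.len s)
  let p := PySem.List.pyGetD suf j (0, 0)
  base + p.2 - mid * p.1

-- the 'while start <= end' binary search of B (same fuel discipline as pvLoopA)
def pvLoopB (base : Int) (s : List (Int × Int)) (suf : List (Int × Int)) (limit : Int) :
    Nat → Int → Int → Int → Int
  | 0, _, _, level => level
  | fuel + 1, start, fin, level =>
    if start ≤ fin then
      let mid := PySem.Int.floordiv (start + fin) 2
      if pvTotalB base s suf mid ≤ limit then
        pvLoopB base s suf limit fuel start (mid - 1) mid
      else
        pvLoopB base s suf limit fuel (mid + 1) fin level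
    else level

def solution_alt (diffs : List Int) (times : List Int) (limit : Int) : Int :=
  let bp := pvBuild diffs times
  let s := PySem.List.sorted bp.2 (fun p => p.1) false
  let suf := pvSuf s
  let start := (PySem.List.min? diffs (fun x => x)).getD 0
  let fin := (PySem.List.max? diffs (fun x => x)).getD 0
  pvLoopB bp.1 s suf limit (fin + 1 - start).toNat start fin 0

-- ===== PRECONDITION & SPEC =====
-- A raises ValueError on empty diffs (min/max) and IndexError when times is
-- shorter than diffs (times[i]); exactly those inputs are excluded.
def Pre_solution (diffs : List Int) (times : List Int) (limit : Int) : Prop :=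
  diffs ≠ [] ∧ diffs.length ≤ times.length

instance (diffs : List Int) (times : List Int) (limit : Int) : Decidable (Pre_solution diffs times limit) := by unfold Pre_solution; infer_instance

def pvWitness_solution : List Int × List Int × Int := ([2, 5, 3], [4, 1, 2], 30)

def Spec_solution (diffs : List Int) (times : List Int) (limit : Int) (out : Int) : Prop := out = solution_alt diffs times limit
instance (diffs : List Int) (times : List Int) (limit : Int) (out : Int) : Decidable (Spec_solution diffs times limit out) := by unfold Spec_solution; infer_instance

-- ===== CLAIM (what is proved, stated in full; the proofs are below) =====
def Claim_equal_solution : Prop := ∀ (diffs : List Int) (times : List Int) (limit : Int), Dom_solution diffs times limit → Pre_solution diffs times limit → Spec_solution diffs times limit (solution diffs times limit)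

-- ===== LEMMAS AND PROOFS =====

-- proof-side helpers: the (d, w) pair and base characterisation shared by both ports
def pvPairFn (diffs : List Int) (times : List Int) (i : Int) : Int × Int :=
  (PySem.List.pyGetD diffs i 0,
   PySem.List.pyGetD times i 0 + (if i ≠ 0 then PySem.List.pyGetD times (i - 1) 0 else 0))

def pvPairs (diffs : List Int) (times : List Int) : List (Int × Int) :=
  (PySem.List.pyRange 0 (PySem.List.len diffs) 1).map (pvPairFn diffs times)

def pvBase (diffs : List Int) (times : List Int) : Int :=
  ((PySem.List.pyRange 0 (PySem.List.len diffs) 1).map (fun i => PySem.List.pyGetD times i 0)).sum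

-- the contribution of a pair above the threshold
def pvG (x : Int) (p : Int × Int) : Int := if x < p.1 then (p.1 - x) * p.2 else 0

lemma pvBuild_eq (diffs times : List Int) :
    pvBuild diffs times = (pvBase diffs times, pvPairs diffs times) := by
  unfold pvBuild
  have hfun : (fun (acc : Int × List (Int × Int)) (i : Int) =>
      let prev : Int := if i ≠ 0 then PySem.List.pyGetD times (i - 1) 0 else 0
      (acc.1 + PySem.List.pyGetD times i 0,
       acc.2 ++ [(PySem.List.pyGetD diffs i 0, PySem.List.pyGetD times i 0 + prev)]))
      = (fun (acc : Int × List (Int × Int)) (i : Int) =>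
          (acc.1 + PySem.List.pyGetD times i 0, acc.2 ++ [pvPairFn diffs times i])) := by
    funext acc i; simp [pvPairFn]
  rw [hfun]
  rw [PySem.List.foldl_prod_mk
    (f := fun acc i => acc + PySem.List.pyGetD times i 0)
    (g := fun acc i => acc ++ [pvPairFn diffs times i])]
  rw [PySem.List.foldl_add (g := fun i => PySem.List.pyGetD times i 0),
      PySem.List.foldl_append_singleton_eq_map]
  simp [pvBase, pvPairs]

lemma pvTotalA_eq (diffs times : List Int) (mid : Int) :
    pvTotalA diffs times mid
      = pvBase diffs times + ((pvPairs diffs times).map (pvG mid)).sum := by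
  unfold pvTotalA
  rw [PySem.List.foldl_add (g := fun i =>
    if PySem.List.pyGetD diffs i 0 > mid then
      (PySem.List.pyGetD diffs i 0 - mid) * (PySem.List.pyGetD times i 0 +
        (if i ≠ 0 then PySem.List.pyGetD times (i - 1) 0 else 0)) + PySem.List.pyGetD times i 0
    else PySem.List.pyGetD times i 0)]
  rw [List.map_congr_left (f := fun i =>
    if PySem.List.pyGetD diffs i 0 > mid then
      (PySem.List.pyGetD diffs i 0 - mid) * (PySem.List.pyGetD times i 0 +
        (if i ≠ 0 then PySem.List.pyGetD times (i - 1) 0 else 0)) + PySem.List.pyGetD times i 0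
    else PySem.List.pyGetD times i 0)
    (g := fun i => PySem.List.pyGetD times i 0 + pvG mid (pvPairFn diffs times i))
    (fun i _ => by simp only [pvG, pvPairFn, gt_iff_lt]; split_ifs <;> ring)]
  rw [PySem.List.sum_map_add_int]
  simp [pvBase, pvPairs, List.map_map, Function.comp_def]

lemma pvSuf_getD (s : List (Int × Int)) (j : Nat) (hj : j ≤ s.length) :
    (pvSuf s).getD j (0, 0)
      = (((s.drop j).map Prod.snd).sum, ((s.drop j).map (fun p => p.1 * p.2)).sum) := by
  induction s generalizing j with
  | nil =>
    have h0 : j = 0 := by simpa using hj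
    subst h0; simp [pvSuf]
  | cons p r ih =>
    cases j with
    | zero =>
      have h0 := ih 0 (by omega)
      simp only [pvSuf, List.getD_cons_zero]
      have hhead : (pvSuf r).headD (0, 0) = (pvSuf r).getD 0 (0, 0) := by
        cases pvSuf r <;> simp
      rw [hhead, h0]
      simp only [List.drop_zero, List.map_cons, List.sum_cons, Prod.ext_iff]
      constructor <;> ring
    | succ j =>
      simp only [pvSuf, List.getD_cons_succ, List.drop_succ_cons]
      exact ih j (by simpa using hj)

lemma pvCountLe_spec (s : List (Int × Int)) (x : Int)
    (hs : s.Pairwise (fun a b => a.1 ≤ b.1)) :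
    ∀ n : Nat, ∀ lo hi : Int, (hi - lo).toNat ≤ n →
      0 ≤ lo → lo ≤ hi → hi ≤ (s.length : Int) →
      (∀ (k : Nat) (hk : k < s.length), (k : Int) < lo → s[k].1 ≤ x) →
      (∀ (k : Nat) (hk : k < s.length), hi ≤ (k : Int) → x < s[k].1) →
      ∃ j : Nat, pvCountLe s x n lo hi = (j : Int) ∧ j ≤ s.length ∧
        (∀ (k : Nat) (hk : k < s.length), (k < j → s[k].1 ≤ x) ∧ (j ≤ k → x < s[k].1)) := by
  have hmono : ∀ (a b : Nat) (ha : a < s.length) (hb : b < s.length), a ≤ b → s[a].1 ≤ s[b].1 := by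
    intro a b ha hb hab
    rcases Nat.lt_or_ge a b with h | h
    · exact (List.pairwise_iff_getElem.mp hs) a b ha hb h
    · have : a = b := by omega
      subst this; exact le_refl _
  intro n
  induction n with
  | zero =>
    intro lo hi hfuel h0 hlh hhi hlow hhigh
    refine ⟨lo.toNat, by simp [pvCountLe]; omega, by omega, ?_⟩
    intro k hk
    exact ⟨fun hklt => hlow k hk (by omega), fun hkge => hhigh k hk (by omega)⟩
  | succ n ih =>
    intro lo hi hfuel h0 hlh hhi hlow hhigh
    by_cases h : lo < hi
    · have hq := PySem.Int.floordiv_mul_add_mod (lo + hi) 2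
      have hr1 := PySem.Int.mod_nonneg (lo + hi) (by norm_num : (0:Int) < 2)
      have hr2 := PySem.Int.mod_lt (lo + hi) (by norm_num : (0:Int) < 2)
      have hm0 : 0 ≤ PySem.Int.floordiv (lo + hi) 2 := by omega
      have hmlt : PySem.Int.floordiv (lo + hi) 2 < (s.length : Int) := by omega
      have hget : PySem.List.pyGetD s (PySem.Int.floordiv (lo + hi) 2) (0, 0)
          = s[(PySem.Int.floordiv (lo + hi) 2).toNat]'(by omega) :=
        PySem.List.pyGetD_eq_getElem s (0, 0) hm0 hmlt
      have hstep : pvCountLe s x (n + 1) lo hi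
          = (if (PySem.List.pyGetD s (PySem.Int.floordiv (lo + hi) 2) (0, 0)).1 ≤ x then
              pvCountLe s x n (PySem.Int.floordiv (lo + hi) 2 + 1) hi
            else pvCountLe s x n lo (PySem.Int.floordiv (lo + hi) 2)) := by
        simp only [pvCountLe, if_pos h]
      rw [hstep, hget]
      split_ifs with hcmp
      · -- pairs[m].1 ≤ x : recurse on (m+1, hi)
        apply ih (PySem.Int.floordiv (lo + hi) 2 + 1) hi (by omega) (by omega) (by omega) hhi
        · intro k hk hklt
          by_cases hko : (k : Int) < lo
          · exact hlow k hk hko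
          · exact le_trans (hmono k (PySem.Int.floordiv (lo + hi) 2).toNat hk (by omega)
              (by omega)) hcmp
        · exact hhigh
      · -- x < pairs[m].1 : recurse on (lo, m)
        push Not at hcmp
        apply ih lo (PySem.Int.floordiv (lo + hi) 2) (by omega) h0 (by omega) (by omega) hlow
        intro k hk hkge
        exact lt_of_lt_of_le hcmp (hmono (PySem.Int.floordiv (lo + hi) 2).toNat k (by omega) hk
          (by omega))
    · refine ⟨lo.toNat, by simp [pvCountLe, if_neg h]; omega, by omega, ?_⟩
      intro k hk
      exact ⟨fun hklt => hlow k hk (by omega), fun hkge => hhigh k hk (by omega)⟩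

lemma pvSum_linear (l : List (Int × Int)) (x : Int) :
    (l.map (fun p => (p.1 - x) * p.2)).sum
      = (l.map (fun p => p.1 * p.2)).sum - x * (l.map Prod.snd).sum := by
  induction l with
  | nil => simp
  | cons p r ih => simp [ih]; ring

lemma pvTotalB_eq (base : Int) (s : List (Int × Int)) (mid : Int)
    (hs : s.Pairwise (fun a b => a.1 ≤ b.1)) :
    pvTotalB base s (pvSuf s) mid = base + (s.map (pvG mid)).sum := by
  obtain ⟨j, hj, hjle, hjprop⟩ :=
    pvCountLe_spec s mid hs ((PySem.List.len s).toNat) 0 (s.length : Int)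
      (by rw [PySem.List.len_eq]; omega) (by omega) (by omega) (by omega)
      (fun k hk hklt => by omega)
      (fun k hk hkge => by omega)
  unfold pvTotalB
  simp only [PySem.List.len_eq] at hj ⊢
  rw [hj]
  rw [show PySem.List.pyGetD (pvSuf s) (j : Int) (0, 0) = (pvSuf s).getD j (0, 0) from
    PySem.List.pyGetD_natCast (pvSuf s) j (0, 0)]
  rw [pvSuf_getD s j hjle]
  conv_rhs => rw [← List.take_append_drop j s]
  rw [List.map_append, List.sum_append]
  have htake : ((s.take j).map (pvG mid)).sum = 0 := by
    apply List.sum_eq_zero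
    intro a ha
    obtain ⟨p, hp, rfl⟩ := List.mem_map.mp ha
    obtain ⟨i, hi, rfl⟩ := List.mem_iff_getElem.mp hp
    have hi' : i < s.length := lt_of_lt_of_le hi (by simp [List.length_take])
    rw [List.getElem_take]
    have hle : s[i].1 ≤ mid := (hjprop i hi').1 (by simp [List.length_take] at hi; omega)
    simp [pvG, not_lt.mpr hle]
  have hdrop : ((s.drop j).map (pvG mid)).sum
      = ((s.drop j).map (fun p => (p.1 - mid) * p.2)).sum := by
    congr 1
    apply List.map_congr_left
    intro p hp
    obtain ⟨i, hi, rfl⟩ := List.mem_iff_getElem.mp hp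
    have hji : j + i < s.length := by simp [List.length_drop] at hi; omega
    rw [List.getElem_drop]
    have hgt : mid < (s[j + i]'hji).1 := (hjprop (j + i) hji).2 (by omega)
    simp [pvG, hgt]
  rw [htake, hdrop, pvSum_linear]
  ring

lemma pvLoop_eq (diffs times : List Int) (base : Int) (s : List (Int × Int)) (limit : Int)
    (htot : ∀ mid, pvTotalA diffs times mid = pvTotalB base s (pvSuf s) mid) :
    ∀ n : Nat, ∀ start fin level : Int,
      pvLoopA diffs times limit n start fin level
        = pvLoopB base s (pvSuf s) limit n start fin level := by
  intro n
  induction n with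
  | zero => intro start fin level; rfl
  | succ n ih =>
    intro start fin level
    simp only [pvLoopA, pvLoopB, htot]
    by_cases h : start ≤ fin
    · simp only [if_pos h]
      split_ifs with hcmp
      · exact ih start (PySem.Int.floordiv (start + fin) 2 - 1)
          (PySem.Int.floordiv (start + fin) 2)
      · exact ih (PySem.Int.floordiv (start + fin) 2 + 1) fin level
    · simp only [if_neg h]

-- ===== VERDICT (by name: the statement is the Claim_ definition above) =====
theorem solution_spec : Claim_equal_solution := by
  intro diffs times limit _ _
  unfold Spec_solution solution solution_alt
  simp only [pvBuild_eq]
  apply pvLoop_eq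
  intro mid
  rw [pvTotalA_eq,
      pvTotalB_eq _ _ _ (PySem.List.sorted_pairwise (pvPairs diffs times) (fun p => p.1))]
  congr 1
  exact (List.Perm.sum_eq (List.Perm.map (pvG mid)
    (PySem.List.sorted_perm (pvPairs diffs times) (fun p => p.1) false))).symm
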